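-- pv_equiv track=rewrite | github.com/seungg-0/algorithm | 프로그래머스/2/77485. 행렬 테두리 회전하기/행렬 테두리 회전하기.py | solution
-- ===== SOURCE A (Python) =====
-- from collections import deque
--
-- def solution(rows, columns, queries):
--     answer = []
--     graph = [[0]*columns for _ in range(rows)]
--     cnt = 1
--     for i in range(rows):
--         for j in range(columns):
--             graph[i][j] = cnt
--             cnt += 1
--
--     def outline(x1, y1, x2, y2):
--         queue = deque()
--         for i in range(y1-1, y2): # 윗줄
--             queue.append(graph[x1-1][i])
--         for i in range(x1, x2): # 오른쪽
--             queue.append(graph[i][y2-1])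
--         for i in range(y2-2, y1-2, -1): # 아랫줄
--             queue.append(graph[x2-1][i])
--         for i in range(x2-2, x1-1, -1): # 왼쪽
--             queue.append(graph[i][y1-1])
--         return queue
--
--     def update(x1, y1, x2, y2, queue):
--         for i in range(y1-1, y2): # 윗줄
--             graph[x1-1][i] = queue.popleft()
--         for i in range(x1, x2): # 오른쪽
--             graph[i][y2-1] = queue.popleft()
--         for i in range(y2-2, y1-2, -1): # 아랫줄
--             graph[x2-1][i] = queue.popleft()
--         for i in range(x2-2, x1-1, -1): # 왼쪽
--             graph[i][y1-1] = queue.popleft()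
--
--     for x1, y1, x2, y2 in queries:
--         queue = outline(x1, y1, x2, y2)
--         queue.rotate(1) # 시계방향으로 한 번 회전
--         update(x1, y1, x2, y2, queue)
--         queue = outline(x1, y1, x2, y2)
--         answer.append(min(queue))
--
--     return answer
-- ===== SOURCE B (Python) =====
-- def solution(rows, columns, queries):
--     g = [[r * columns + c + 1 for c in range(columns)] for r in range(rows)]
--     answer = []
--     for x1, y1, x2, y2 in queries:
--         r1, c1, r2, c2 = x1 - 1, y1 - 1, x2 - 1, y2 - 1
--         saved = g[r1][c1]          # top-left corner, written last
--         m = saved                  # running minimum of the old border values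
--         for r in range(r1, r2):          # left column shifts up
--             v = g[r + 1][c1]
--             g[r][c1] = v
--             if v < m:
--                 m = v
--         for c in range(c1, c2):          # bottom row shifts left
--             v = g[r2][c + 1]
--             g[r2][c] = v
--             if v < m:
--                 m = v
--         for r in range(r2, r1, -1):      # right column shifts down
--             v = g[r - 1][c2]
--             g[r][c2] = v
--             if v < m:
--                 m = v
--         for c in range(c2, c1 + 1, -1):  # top row shifts right
--             v = g[r1][c - 1]
--             g[r1][c] = v
--             if v < m:
--                 m = v
--         g[r1][c1 + 1] = saved
--         answer.append(m)
--     return answer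
-- ===== Notes on version B (the rewrite author's own statement) =====
-- stated objective: alternative
-- what changed: B drops A's deque entirely: instead of extracting the border into a queue, rotate(1)-ing it, writing it back and extracting the border a second time to take its min, B performs a single in-place clockwise shift of the border cells (one saved corner temporary) while tracking the running minimum of the border values in the same traversal.
-- outside the precondition, e.g. on solution(1, 3, [[1, 1, 1, 3]]): A returns [2], B returns [1]; on solution(1, 1, [[1, 1, 1, 1]]): A returns [1], B raises IndexError; on solution(2, 2, [[2, 1, 1, 2]]): A returns [1], B returns [2]
import Mathlib
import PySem

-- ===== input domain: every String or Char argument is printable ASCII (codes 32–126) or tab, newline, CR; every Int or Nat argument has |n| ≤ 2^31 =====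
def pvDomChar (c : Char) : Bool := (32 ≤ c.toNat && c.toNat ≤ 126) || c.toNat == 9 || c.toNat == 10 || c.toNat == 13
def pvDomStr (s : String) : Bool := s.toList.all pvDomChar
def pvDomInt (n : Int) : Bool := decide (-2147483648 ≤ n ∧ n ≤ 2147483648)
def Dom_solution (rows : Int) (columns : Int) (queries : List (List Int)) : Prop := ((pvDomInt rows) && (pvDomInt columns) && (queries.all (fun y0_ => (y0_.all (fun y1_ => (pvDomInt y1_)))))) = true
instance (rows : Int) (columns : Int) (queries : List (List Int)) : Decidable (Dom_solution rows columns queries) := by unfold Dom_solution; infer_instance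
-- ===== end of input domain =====

-- B replaces A's deque: instead of extracting the border into a queue, rotating it, writing it
-- back and extracting it a second time for the minimum, B does a single in-place clockwise shift
-- of the border cells (one saved corner value) while tracking the running minimum.

-- ===== PORT A =====
-- graph[i][j]  (read; Python-exact for any in-range index via pyGetD)
def gget (g : List (List Int)) (i j : Int) : Int :=
  PySem.List.pyGetD (PySem.List.pyGetD g i []) j 0

-- graph[i][j] = v  (write; exact for the nonnegative in-range indices Pre_ guarantees)
def gset (g : List (List Int)) (i j : Int) (v : Int) : List (List Int) :=
  g.modify i.toNat (fun row => row.set j.toNat v)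

-- A's local helper outline(x1, y1, x2, y2) (the grid is passed explicitly)
def pvOutline (g : List (List Int)) (x1 y1 x2 y2 : Int) : List Int :=
  let q := (PySem.List.pyRange (y1-1) y2 1).foldl (fun q i => q ++ [gget g (x1-1) i]) ([] : List Int)
  let q := (PySem.List.pyRange x1 x2 1).foldl (fun q i => q ++ [gget g i (y2-1)]) q
  let q := (PySem.List.pyRange (y2-2) (y1-2) (-1)).foldl (fun q i => q ++ [gget g (x2-1) i]) q
  (PySem.List.pyRange (x2-2) (x1-1) (-1)).foldl (fun q i => q ++ [gget g i (y1-1)]) q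

-- A's local helper update(x1, y1, x2, y2, queue): state = (grid, remaining queue)
def pvUpdate (g : List (List Int)) (x1 y1 x2 y2 : Int) (queue : List Int) : List (List Int) :=
  let st : List (List Int) × List Int := (g, queue)
  let st := (PySem.List.pyRange (y1-1) y2 1).foldl (fun (st : List (List Int) × List Int) i => (gset st.1 (x1-1) i (st.2.headD 0), st.2.tail)) st
  let st := (PySem.List.pyRange x1 x2 1).foldl (fun (st : List (List Int) × List Int) i => (gset st.1 i (y2-1) (st.2.headD 0), st.2.tail)) st
  let st := (PySem.List.pyRange (y2-2) (y1-2) (-1)).foldl (fun (st : List (List Int) × List Int) i => (gset st.1 (x2-1) i (st.2.headD 0), st.2.tail)) st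
  let st := (PySem.List.pyRange (x2-2) (x1-1) (-1)).foldl (fun (st : List (List Int) × List Int) i => (gset st.1 i (y1-1) (st.2.headD 0), st.2.tail)) st
  st.1

-- deque.rotate(1): q becomes q[-1:] + q[:-1]
def pvRotate1 {α : Type} (q : List α) : List α := q.drop (q.length - 1) ++ q.take (q.length - 1)

-- graph = [[0]*columns ...] then the cnt-numbering loop
def pvInitA (rows columns : Int) : List (List Int) :=
  let graph := (PySem.List.pyRange 0 rows 1).map (fun _ => (PySem.List.pyRange 0 columns 1).map (fun _ => (0 : Int)))
  ((PySem.List.pyRange 0 rows 1).foldl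
    (fun (st : List (List Int) × Int) i =>
      (PySem.List.pyRange 0 columns 1).foldl (fun (st : List (List Int) × Int) j => (gset st.1 i j st.2, st.2 + 1)) st)
    (graph, 1)).1

-- body of A's 'for x1, y1, x2, y2 in queries' loop; state = (graph, answer)
def pvStepA (st : List (List Int) × List Int) (q : List Int) : List (List Int) × List Int :=
  match q with
  | [x1, y1, x2, y2] =>
    let queue := pvOutline st.1 x1 y1 x2 y2
    let queue := pvRotate1 queue
    let g := pvUpdate st.1 x1 y1 x2 y2 queue
    let queue2 := pvOutline g x1 y1 x2 y2
    (g, st.2 ++ [(PySem.List.min? queue2 (fun y => y)).getD 0])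
  | _ => st  -- tuple unpacking raises here; excluded by Pre_

def solution (rows : Int) (columns : Int) (queries : List (List Int)) : List Int :=
  (queries.foldl pvStepA (pvInitA rows columns, [])).2

-- ===== PORT B =====
-- g = [[r*columns + c + 1 for c in range(columns)] for r in range(rows)]
def pvGridB (rows columns : Int) : List (List Int) :=
  (PySem.List.pyRange 0 rows 1).map (fun r => (PySem.List.pyRange 0 columns 1).map (fun c => r * columns + c + 1))

-- body of B's query loop: in-place clockwise border shift with a running minimum
def pvStepB (st : List (List Int) × List Int) (q : List Int) : List (List Int) × List Int :=
  match q with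
  | [x1, y1, x2, y2] =>
    let r1 := x1 - 1
    let c1 := y1 - 1
    let r2 := x2 - 1
    let c2 := y2 - 1
    let saved := gget st.1 r1 c1
    let gm := (PySem.List.pyRange r1 r2 1).foldl
        (fun (gm : List (List Int) × Int) r =>
          let v := gget gm.1 (r + 1) c1
          (gset gm.1 r c1 v, if v < gm.2 then v else gm.2)) (st.1, saved)
    let gm := (PySem.List.pyRange c1 c2 1).foldl
        (fun (gm : List (List Int) × Int) c =>
          let v := gget gm.1 r2 (c + 1)
          (gset gm.1 r2 c v, if v < gm.2 then v else gm.2)) gm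
    let gm := (PySem.List.pyRange r2 r1 (-1)).foldl
        (fun (gm : List (List Int) × Int) r =>
          let v := gget gm.1 (r - 1) c2
          (gset gm.1 r c2 v, if v < gm.2 then v else gm.2)) gm
    let gm := (PySem.List.pyRange c2 (c1 + 1) (-1)).foldl
        (fun (gm : List (List Int) × Int) c =>
          let v := gget gm.1 r1 (c - 1)
          (gset gm.1 r1 c v, if v < gm.2 then v else gm.2)) gm
    (gset gm.1 r1 (c1 + 1) saved, st.2 ++ [gm.2])
  | _ => st

def solution_alt (rows : Int) (columns : Int) (queries : List (List Int)) : List Int :=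
  (queries.foldl pvStepB (pvGridB rows columns, [])).2

-- ===== PRECONDITION & SPEC =====
-- Pre_ keeps exactly the rectangles the problem statement guarantees (1 ≤ x1 < x2 ≤ rows,
-- 1 ≤ y1 < y2 ≤ columns, four entries per query): outside them A either raises (out-of-range
-- or malformed queries) or returns an accidental value for a degenerate/reversed rectangle,
-- a corner the problem never specifies and on part of which B raises.
def Pre_solution (rows : Int) (columns : Int) (queries : List (List Int)) : Prop :=
  ∀ q ∈ queries, q.length = 4 ∧
    1 ≤ q.getD 0 0 ∧ q.getD 0 0 < q.getD 2 0 ∧ q.getD 2 0 ≤ rows ∧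
    1 ≤ q.getD 1 0 ∧ q.getD 1 0 < q.getD 3 0 ∧ q.getD 3 0 ≤ columns
instance (rows : Int) (columns : Int) (queries : List (List Int)) : Decidable (Pre_solution rows columns queries) := by unfold Pre_solution; infer_instance

def pvWitness_solution : Int × Int × List (List Int) := (4, 5, [[1, 2, 3, 4], [2, 2, 4, 5]])

def Spec_solution (rows : Int) (columns : Int) (queries : List (List Int)) (out : List Int) : Prop := out = solution_alt rows columns queries
instance (rows : Int) (columns : Int) (queries : List (List Int)) (out : List Int) : Decidable (Spec_solution rows columns queries out) := by unfold Spec_solution; infer_instance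

-- ===== CLAIM (what is proved, stated in full; the proofs are below) =====
def Claim_equal_solution : Prop := ∀ (rows : Int) (columns : Int) (queries : List (List Int)), Dom_solution rows columns queries → Pre_solution rows columns queries → Spec_solution rows columns queries (solution rows columns queries)

-- ===== LEMMAS AND PROOFS =====

-- well-formed grid of rows.toNat rows, each of columns.toNat cells
def Wf (R C : Int) (g : List (List Int)) : Prop :=
  g.length = R.toNat ∧ ∀ (k : Nat) (h : k < g.length), (g[k]).length = C.toNat

def InB (R C : Int) (p : Int × Int) : Prop := 0 ≤ p.1 ∧ p.1 < R ∧ 0 ≤ p.2 ∧ p.2 < C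

-- sequential writes
def wr (g : List (List Int)) (l : List ((Int × Int) × Int)) : List (List Int) :=
  l.foldl (fun g pv => gset g pv.1.1 pv.1.2 pv.2) g

def gg (g : List (List Int)) (p : Int × Int) : Int := gget g p.1 p.2

-- border positions in A's clockwise outline order (r1 c1 r2 c2 are 0-based corners)
def posA (r1 c1 r2 c2 : Int) : List (Int × Int) :=
  (PySem.List.pyRange c1 (c2+1) 1).map (fun j => (r1, j))
  ++ (PySem.List.pyRange (r1+1) (r2+1) 1).map (fun i => (i, c2))
  ++ (PySem.List.pyRange (c2-1) (c1-1) (-1)).map (fun j => (r2, j))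
  ++ (PySem.List.pyRange (r2-1) r1 (-1)).map (fun i => (i, c1))

-- cells B writes, in B's order (left col, bottom row, right col, top row, saved corner drop)
def posB (r1 c1 r2 c2 : Int) : List (Int × Int) :=
  (PySem.List.pyRange r1 r2 1).map (fun r => (r, c1))
  ++ (PySem.List.pyRange c1 c2 1).map (fun c => (r2, c))
  ++ (PySem.List.pyRange r2 r1 (-1)).map (fun r => (r, c2))
  ++ (PySem.List.pyRange c2 (c1+1) (-1)).map (fun c => (r1, c))
  ++ [(r1, c1+1)]

-- clockwise predecessor of a border cell
def predp (r1 c1 r2 c2 : Int) (p : Int × Int) : Int × Int :=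
  if p.2 = c1 ∧ p.1 < r2 then (p.1 + 1, c1)
  else if p.1 = r2 ∧ p.2 < c2 then (r2, p.2 + 1)
  else if p.2 = c2 ∧ r1 < p.1 then (p.1 - 1, c2)
  else (p.1, p.2 - 1)

def onB (r1 c1 r2 c2 : Int) (p : Int × Int) : Prop :=
  r1 ≤ p.1 ∧ p.1 ≤ r2 ∧ c1 ≤ p.2 ∧ p.2 ≤ c2 ∧ (p.1 = r1 ∨ p.1 = r2 ∨ p.2 = c1 ∨ p.2 = c2)

theorem gset_wf {R C : Int} {g : List (List Int)} (h : Wf R C g) (i j v : Int) : Wf R C (gset g i j v) := by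
  obtain ⟨h1, h2⟩ := h
  refine ⟨by simpa [gset] using h1, ?_⟩
  intro k hk
  have hk' : k < g.length := by simpa [gset] using hk
  have hg : (gset g i j v)[k] = if i.toNat = k then (g[k]'hk').set j.toNat v else g[k]'hk' := by
    simp [gset, List.getElem_modify]
  rw [hg]
  split
  · simpa using h2 k hk'
  · exact h2 k hk'

theorem gget_gset_same {R C : Int} {g : List (List Int)} (hwf : Wf R C g) {i j : Int}
    (h : InB R C (i, j)) (v : Int) : gget (gset g i j v) i j = v := by
  obtain ⟨hi0, hiR, hj0, hjC⟩ := h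
  obtain ⟨h1, h2⟩ := hwf
  have hRpos : 0 ≤ R := le_of_lt (lt_of_le_of_lt hi0 hiR)
  have hCpos : 0 ≤ C := le_of_lt (lt_of_le_of_lt hj0 hjC)
  have hik : i.toNat < g.length := by omega
  have hrow : (g[i.toNat]'hik).length = C.toNat := h2 i.toNat hik
  have hjk : j.toNat < (g[i.toNat]'hik).length := by omega
  have hlen : i.toNat < (g.modify i.toNat (fun row => row.set j.toNat v)).length := by
    simpa using hik
  have hjlen : j.toNat < ((g[i.toNat]'hik).set j.toNat v).length := by simpa using hjk
  unfold gget gset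
  rw [PySem.List.pyGetD_of_nonneg _ _ hi0]
  rw [List.getD_eq_getElem?_getD, List.getElem?_eq_getElem hlen, List.getElem_modify, if_pos rfl]
  simp only [Option.getD_some]
  rw [PySem.List.pyGetD_of_nonneg _ _ hj0, List.getD_eq_getElem?_getD,
      List.getElem?_eq_getElem hjlen, List.getElem_set_self]
  rfl

theorem gget_gset_ne {g : List (List Int)} {i j i' j' : Int} (hne : (i, j) ≠ (i', j'))
    (hi : 0 ≤ i) (hj : 0 ≤ j) (hi' : 0 ≤ i') (hj' : 0 ≤ j') (v : Int) :
    gget (gset g i j v) i' j' = gget g i' j' := by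
  unfold gget gset
  rw [PySem.List.pyGetD_of_nonneg _ _ hi', PySem.List.pyGetD_of_nonneg _ _ hi',
      List.getD_eq_getElem?_getD, List.getD_eq_getElem?_getD]
  by_cases hii : i = i'
  · subst hii
    have hjj : j.toNat ≠ j'.toNat := by
      intro hc
      exact hne (by simp [Prod.ext_iff]; omega)
    by_cases hir : i.toNat < g.length
    · have hmlen : i.toNat < (g.modify i.toNat (fun row => row.set j.toNat v)).length := by
        simpa using hir
      rw [List.getElem?_eq_getElem hmlen, List.getElem_modify, if_pos rfl,
          List.getElem?_eq_getElem hir]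
      simp only [Option.getD_some]
      rw [PySem.List.pyGetD_of_nonneg _ _ hj', PySem.List.pyGetD_of_nonneg _ _ hj',
          List.getD_eq_getElem?_getD, List.getD_eq_getElem?_getD, List.getElem?_set]
      simp [hjj]
    · have e1 : (g.modify i.toNat (fun row => row.set j.toNat v))[i.toNat]? = none := by
        rw [List.getElem?_eq_none_iff]
        simpa using Nat.le_of_not_lt hir
      have e2 : g[i.toNat]? = none := by
        rw [List.getElem?_eq_none_iff]
        exact Nat.le_of_not_lt hir
      rw [e1, e2]
  · have : i.toNat ≠ i'.toNat := by omega
    rw [List.getElem?_modify]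
    cases hg : g[i'.toNat]? <;> simp [this]

theorem gget_nat (g : List (List Int)) (n m : Nat) (hn : n < g.length)
    (hm : m < (g[n]'hn).length) : gget g (n : Int) (m : Int) = (g[n]'hn)[m]'hm := by
  unfold gget
  rw [PySem.List.pyGetD_of_nonneg _ _ (Int.natCast_nonneg n),
      PySem.List.pyGetD_of_nonneg _ _ (Int.natCast_nonneg m)]
  simp [List.getD_eq_getElem?_getD, hn, hm]

theorem wr_append (g : List (List Int)) (l1 l2 : List ((Int × Int) × Int)) :
    wr g (l1 ++ l2) = wr (wr g l1) l2 := by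
  simp [wr]

theorem wr_wf {R C : Int} {g : List (List Int)} (h : Wf R C g) (l : List ((Int × Int) × Int)) :
    Wf R C (wr g l) := by
  induction l generalizing g with
  | nil => exact h
  | cons pv t ih => exact ih (gset_wf h _ _ _)

theorem gget_wr_ne {g : List (List Int)} {l : List ((Int × Int) × Int)} {x : Int × Int}
    (hk : ∀ pv ∈ l, 0 ≤ pv.1.1 ∧ 0 ≤ pv.1.2) (hx1 : 0 ≤ x.1) (hx2 : 0 ≤ x.2)
    (h : ∀ pv ∈ l, pv.1 ≠ x) : gg (wr g l) x = gg g x := by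
  induction l generalizing g with
  | nil => rfl
  | cons pv t ih =>
    have step : wr g (pv :: t) = wr (gset g pv.1.1 pv.1.2 pv.2) t := rfl
    rw [step, ih (fun q hq => hk q (List.mem_cons_of_mem _ hq))
          (fun q hq => h q (List.mem_cons_of_mem _ hq))]
    obtain ⟨⟨a, b⟩, v⟩ := pv
    obtain ⟨u, w⟩ := x
    have hab := hk ((a, b), v) (List.mem_cons_self)
    exact gget_gset_ne (h _ (List.mem_cons_self)) hab.1 hab.2 hx1 hx2 v

theorem gget_wr_mem{R C : Int} {g : List (List Int)} {l : List ((Int × Int) × Int)}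
    {x : Int × Int} {v : Int} (hwf : Wf R C g) (hk : ∀ pv ∈ l, InB R C pv.1)
    (hnd : (l.map Prod.fst).Nodup) (hm : (x, v) ∈ l) : gg (wr g l) x = v := by
  induction l generalizing g with
  | nil => simp at hm
  | cons pv t ih =>
    have step : wr g (pv :: t) = wr (gset g pv.1.1 pv.1.2 pv.2) t := rfl
    rw [List.map_cons, List.nodup_cons] at hnd
    rcases List.mem_cons.mp hm with heq | hmt
    · subst heq
      rw [step]
      have hx := hk (x, v) (List.mem_cons_self)
      have hne : ∀ pv ∈ t, pv.1 ≠ x := by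
        intro q hq hc
        have hq1 : q.1 ∈ t.map Prod.fst := List.mem_map.mpr ⟨q, hq, rfl⟩
        exact hnd.1 (hc ▸ hq1)
      have := gget_wr_ne (g := gset g x.1 x.2 v)
          (fun q hq => ⟨(hk q (List.mem_cons_of_mem _ hq)).1, (hk q (List.mem_cons_of_mem _ hq)).2.2.1⟩)
          hx.1 hx.2.2.1 hne
      rw [this]
      obtain ⟨a, b⟩ := x
      exact gget_gset_same hwf hx v
    · rw [step]
      exact ih (gset_wf hwf _ _ _) (fun q hq => hk q (List.mem_cons_of_mem _ hq)) hnd.2 hmt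

theorem grid_ext{R C : Int} {g1 g2 : List (List Int)} (h1 : Wf R C g1) (h2 : Wf R C g2)
    (h : ∀ p : Int × Int, InB R C p → gg g1 p = gg g2 p) : g1 = g2 := by
  apply List.ext_getElem (h1.1.trans h2.1.symm)
  intro n hn1 hn2
  have hrowlen : (g1[n]'hn1).length = (g2[n]'hn2).length := by
    rw [h1.2 n hn1, h2.2 n hn2]
  apply List.ext_getElem hrowlen
  intro m hm1 hm2
  have hl1 := h1.1
  have hl2 := h1.2 n hn1
  have hInB : InB R C ((n : Int), (m : Int)) := by
    refine ⟨Int.natCast_nonneg n, ?_, Int.natCast_nonneg m, ?_⟩ <;> omega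
  have := h (n, m) hInB
  unfold gg at this
  rwa [gget_nat g1 n m hn1 hm1, gget_nat g2 n m hn2 hm2] at this

-- a Python 'for' loop writing position w(k) from a not-yet-written position rd(k), with a running min
theorem loop_shift (ks : List Int) (w rd : Int → Int × Int) (g : List (List Int)) (m : Int)
    (hfresh : List.Pairwise (fun a b => w a ≠ rd b) ks)
    (hself : ∀ k ∈ ks, w k ≠ rd k)
    (hnn : ∀ k ∈ ks, (0 ≤ (w k).1 ∧ 0 ≤ (w k).2) ∧ (0 ≤ (rd k).1 ∧ 0 ≤ (rd k).2)) :
    ks.foldl (fun (gm : List (List Int) × Int) k =>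
        let v := gget gm.1 (rd k).1 (rd k).2
        (gset gm.1 (w k).1 (w k).2 v, if v < gm.2 then v else gm.2)) (g, m)
    = (wr g (ks.map (fun k => (w k, gg g (rd k)))),
       ks.foldl (fun m k => let v := gg g (rd k); if v < m then v else m) m) := by
  revert hfresh hself hnn
  induction ks generalizing g m with
  | nil => intro _ _ _; rfl
  | cons k t ih =>
    intro hfresh hself hnn
    rw [List.pairwise_cons] at hfresh
    have hknn := hnn k List.mem_cons_self
    simp only [List.foldl_cons, List.map_cons]
    rw [ih (gset g (w k).1 (w k).2 (gget g (rd k).1 (rd k).2))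
        (if gget g (rd k).1 (rd k).2 < m then gget g (rd k).1 (rd k).2 else m) hfresh.2
        (fun a ha => hself a (List.mem_cons_of_mem _ ha))
        (fun a ha => hnn a (List.mem_cons_of_mem _ ha))]
    have hgg : ∀ a ∈ t, gg (gset g (w k).1 (w k).2 (gget g (rd k).1 (rd k).2)) (rd a) = gg g (rd a) := by
      intro a ha
      have hann := hnn a (List.mem_cons_of_mem _ ha)
      have hne : w k ≠ rd a := hfresh.1 a ha
      unfold gg
      exact gget_gset_ne (by simpa using hne) hknn.1.1 hknn.1.2 hann.2.1 hann.2.2 _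
    have hwr : wr g ((w k, gg g (rd k)) :: t.map (fun k' => (w k', gg g (rd k'))))
        = wr (gset g (w k).1 (w k).2 (gget g (rd k).1 (rd k).2)) (t.map (fun k' => (w k', gg g (rd k')))) := rfl
    rw [hwr]
    congr 1
    · exact congrArg _ (List.map_congr_left (fun a ha => by rw [hgg a ha]))
    · exact PySem.List.foldl_congr_mem' t _ _ _ (fun a ha acc => by simp only [hgg a ha])

-- A's update loop: pops the queue head into each position
theorem loop_update (ks : List Int) (w : Int → Int × Int) (g : List (List Int)) (q : List Int)
    (hlen : ks.length ≤ q.length) :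
    ks.foldl (fun (st : List (List Int) × List Int) k =>
        (gset st.1 (w k).1 (w k).2 (st.2.headD 0), st.2.tail)) (g, q)
    = (wr g ((ks.map w).zip q), q.drop ks.length) := by
  revert hlen
  induction ks generalizing g q with
  | nil => intro _; rfl
  | cons k t ih =>
    intro hlen
    cases q with
    | nil => simp at hlen
    | cons a q' =>
      simp only [List.foldl_cons, List.map_cons, List.zip_cons_cons, List.length_cons,
        List.headD_cons, List.tail_cons, List.drop_succ_cons]
      rw [ih (gset g (w k).1 (w k).2 a) q' (by simpa using hlen)]
      rfl

-- the numbering loop of A's grid build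
theorem fill_range (w : Int → Int × Int) (a b : Int) (g : List (List Int)) (c0 : Int) :
    (PySem.List.pyRange a b 1).foldl
      (fun (st : List (List Int) × Int) j => (gset st.1 (w j).1 (w j).2 st.2, st.2 + 1)) (g, c0)
    = (wr g ((PySem.List.pyRange a b 1).map (fun j => (w j, c0 + (j - a)))), c0 + ((b - a).toNat : Int)) := by
  have key : ∀ (n : Nat) (a : Int) (g : List (List Int)) (c0 : Int), (b - a).toNat = n →
      (PySem.List.pyRange a b 1).foldl
        (fun (st : List (List Int) × Int) j => (gset st.1 (w j).1 (w j).2 st.2, st.2 + 1)) (g, c0)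
      = (wr g ((PySem.List.pyRange a b 1).map (fun j => (w j, c0 + (j - a)))), c0 + ((b - a).toNat : Int)) := by
    intro n
    induction n with
    | zero =>
      intro a g c0 hn
      rw [PySem.List.pyRange_one_eq_nil (by omega)]
      simp [hn, wr]
    | succ n ihn =>
      intro a g c0 hn
      have hab : a < b := by omega
      rw [PySem.List.pyRange_one_cons hab]
      simp only [List.foldl_cons, List.map_cons]
      rw [ihn (a + 1) (gset g (w a).1 (w a).2 c0) (c0 + 1) (by omega)]
      have hmap : (PySem.List.pyRange (a+1) b 1).map (fun j => (w j, c0 + 1 + (j - (a+1))))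
          = (PySem.List.pyRange (a+1) b 1).map (fun j => (w j, c0 + (j - a))) :=
        List.map_congr_left (fun j _ => by ring_nf)
      rw [hmap]
      have hwr : wr g ((w a, c0 + (a - a)) :: (PySem.List.pyRange (a+1) b 1).map (fun j => (w j, c0 + (j - a))))
          = wr (gset g (w a).1 (w a).2 (c0 + (a - a))) ((PySem.List.pyRange (a+1) b 1).map (fun j => (w j, c0 + (j - a)))) := rfl
      rw [hwr]
      have ha0 : c0 + (a - a) = c0 := by ring
      rw [ha0]
      refine Prod.ext rfl ?_
      simp only []
      omega
  exact key _ a g c0 rfl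

theorem fill_rows (a b C : Int) (g : List (List Int)) (c0 : Int) :
    (PySem.List.pyRange a b 1).foldl
      (fun (st : List (List Int) × Int) i =>
        (PySem.List.pyRange 0 C 1).foldl
          (fun (st : List (List Int) × Int) j => (gset st.1 i j st.2, st.2 + 1)) st) (g, c0)
    = (wr g ((PySem.List.pyRange a b 1).flatMap
        (fun i => (PySem.List.pyRange 0 C 1).map (fun j => ((i, j), c0 + (i - a) * ((C.toNat : Nat) : Int) + j)))),
       c0 + ((b - a).toNat : Int) * ((C.toNat : Nat) : Int)) := by
  have key : ∀ (n : Nat) (a : Int) (g : List (List Int)) (c0 : Int), (b - a).toNat = n →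
      (PySem.List.pyRange a b 1).foldl
        (fun (st : List (List Int) × Int) i =>
          (PySem.List.pyRange 0 C 1).foldl
            (fun (st : List (List Int) × Int) j => (gset st.1 i j st.2, st.2 + 1)) st) (g, c0)
      = (wr g ((PySem.List.pyRange a b 1).flatMap
          (fun i => (PySem.List.pyRange 0 C 1).map (fun j => ((i, j), c0 + (i - a) * ((C.toNat : Nat) : Int) + j)))),
         c0 + ((b - a).toNat : Int) * ((C.toNat : Nat) : Int)) := by
    intro n
    induction n with
    | zero =>
      intro a g c0 hn
      rw [PySem.List.pyRange_one_eq_nil (show b ≤ a by omega)]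
      simp [hn, wr]
    | succ n ihn =>
      intro a g c0 hn
      have hab : a < b := by omega
      rw [PySem.List.pyRange_one_cons hab]
      simp only [List.foldl_cons, List.flatMap_cons]
      have hrow := fill_range (fun j => (a, j)) 0 C g c0
      simp only [Int.sub_zero] at hrow
      rw [hrow]
      rw [ihn (a + 1) _ _ (by omega)]
      rw [← wr_append]
      refine Prod.ext ?_ ?_
      · simp only []
        congr 1
        congr 1
        · exact List.map_congr_left (fun j _ => by
            have : c0 + (a - a) * ((C.toNat : Nat) : Int) + j = c0 + j := by ring
            rw [this])
        · refine List.flatMap_congr (fun i _ => List.map_congr_left (fun j _ => ?_))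
          have : c0 + ((C.toNat : Nat) : Int) + (i - (a + 1)) * ((C.toNat : Nat) : Int) + j
              = c0 + (i - a) * ((C.toNat : Nat) : Int) + j := by ring
          rw [this]
      · simp only []
        have hsplit : ((b - a).toNat : Int) = ((b - (a+1)).toNat : Int) + 1 := by omega
        rw [hsplit]
        ring
  exact key _ a g c0 rfl

theorem outline_eq (g : List (List Int)) (x1 y1 x2 y2 : Int) :
    pvOutline g x1 y1 x2 y2 = (posA (x1-1) (y1-1) (x2-1) (y2-1)).map (gg g) := by
  unfold pvOutline posA
  rw [PySem.List.foldl_append_singleton_eq_map, PySem.List.foldl_append_singleton_eq_map,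
      PySem.List.foldl_append_singleton_eq_map, PySem.List.foldl_append_singleton_eq_map]
  have e1 : y2 - 1 + 1 = y2 := by ring
  have e2 : x1 - 1 + 1 = x1 := by ring
  have e3 : x2 - 1 + 1 = x2 := by ring
  have e4 : y2 - 1 - 1 = y2 - 2 := by ring
  have e5 : y1 - 1 - 1 = y1 - 2 := by ring
  have e6 : x2 - 1 - 1 = x2 - 2 := by ring
  rw [e1, e2, e3, e4, e5, e6]
  simp [gg, List.map_map, Function.comp_def]

theorem rotate1_map {α β : Type} (f : α → β) (l : List α) :
    pvRotate1 (l.map f) = (pvRotate1 l).map f := by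
  simp [pvRotate1, List.map_drop, List.map_take]

theorem nodup_pyRange_neg (a b : Int) : (PySem.List.pyRange a b (-1)).Nodup := by
  rw [PySem.List.pyRange_neg_one_eq_reverse]
  simp [PySem.List.nodup_pyRange_one]

theorem pyRange_neg_one_snoc {a b : Int} (h : b < a) :
    PySem.List.pyRange a b (-1) = PySem.List.pyRange a (b+1) (-1) ++ [b+1] := by
  rw [PySem.List.pyRange_neg_one_eq_reverse, PySem.List.pyRange_neg_one_eq_reverse,
      PySem.List.pyRange_one_cons (show b+1 < a+1 by omega)]
  simp

theorem rot_snoc {α : Type} (Q : List α) (x : α) : pvRotate1 (Q ++ [x]) = x :: Q := by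
  simp [pvRotate1]

theorem segchar_pos {a b : Int} {f : Int → Int × Int} {P : Int × Int → Prop}
    (h : ∀ j, a ≤ j → j < b → P (f j)) :
    ∀ p ∈ (PySem.List.pyRange a b 1).map f, P p := by
  intro p hp
  rcases List.mem_map.mp hp with ⟨j, hj, rfl⟩
  rw [PySem.List.mem_pyRange_one] at hj
  exact h j hj.1 hj.2

theorem segchar_neg {a b : Int} {f : Int → Int × Int} {P : Int × Int → Prop}
    (h : ∀ j, b < j → j ≤ a → P (f j)) :
    ∀ p ∈ (PySem.List.pyRange a b (-1)).map f, P p := by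
  intro p hp
  rcases List.mem_map.mp hp with ⟨j, hj, rfl⟩
  rw [PySem.List.mem_pyRange_neg_one] at hj
  exact h j hj.1 hj.2

theorem disj_of_sep {X Y : List (Int × Int)} {PX PY : Int × Int → Prop}
    (hX : ∀ p ∈ X, PX p) (hY : ∀ p ∈ Y, PY p)
    (hsep : ∀ p, PX p → PY p → False) : X.Disjoint Y :=
  fun {a} ha hb => hsep a (hX a ha) (hY a hb)

theorem mem_posA {r1 c1 r2 c2 : Int} (h1 : r1 < r2) (h2 : c1 < c2) (p : Int × Int) :
    p ∈ posA r1 c1 r2 c2 ↔ onB r1 c1 r2 c2 p := by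
  obtain ⟨u, v⟩ := p
  simp only [posA, onB, List.mem_append, List.mem_map, PySem.List.mem_pyRange_one,
    PySem.List.mem_pyRange_neg_one, Prod.mk.injEq]
  constructor
  · rintro (((⟨j, hj, rfl, rfl⟩ | ⟨i, hi, rfl, rfl⟩) | ⟨j, hj, rfl, rfl⟩) | ⟨i, hi, rfl, rfl⟩) <;> omega
  · rintro ⟨hb1, hb2, hb3, hb4, hb5⟩
    by_cases hu1 : u = r1
    · exact Or.inl (Or.inl (Or.inl ⟨v, ⟨by omega, by omega⟩, by omega, rfl⟩))
    · by_cases hv2 : v = c2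
      · exact Or.inl (Or.inl (Or.inr ⟨u, ⟨by omega, by omega⟩, rfl, by omega⟩))
      · by_cases hu2 : u = r2
        · exact Or.inl (Or.inr ⟨v, ⟨by omega, by omega⟩, by omega, rfl⟩)
        · exact Or.inr ⟨u, ⟨by omega, by omega⟩, rfl, by omega⟩

theorem nodup_posA {r1 c1 r2 c2 : Int} (h1 : r1 < r2) (h2 : c1 < c2) :
    (posA r1 c1 r2 c2).Nodup := by
  unfold posA
  have n1 : ((PySem.List.pyRange c1 (c2+1) 1).map (fun j => ((r1, j) : Int × Int))).Nodup :=
    (PySem.List.nodup_pyRange_one _ _).map (fun x y hxy => by simpa using hxy)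
  have n2 : ((PySem.List.pyRange (r1+1) (r2+1) 1).map (fun i => ((i, c2) : Int × Int))).Nodup :=
    (PySem.List.nodup_pyRange_one _ _).map (fun x y hxy => by simpa using hxy)
  have n3 : ((PySem.List.pyRange (c2-1) (c1-1) (-1)).map (fun j => ((r2, j) : Int × Int))).Nodup :=
    (nodup_pyRange_neg _ _).map (fun x y hxy => by simpa using hxy)
  have n4 : ((PySem.List.pyRange (r2-1) r1 (-1)).map (fun i => ((i, c1) : Int × Int))).Nodup :=
    (nodup_pyRange_neg _ _).map (fun x y hxy => by simpa using hxy)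
  have c1' := segchar_pos (a := c1) (b := c2+1) (f := fun j => ((r1, j) : Int × Int))
    (P := fun p => p.1 = r1 ∧ c1 ≤ p.2 ∧ p.2 ≤ c2) (fun j hj1 hj2 => by (try dsimp only); exact ⟨rfl, by omega, by omega⟩)
  have c2' := segchar_pos (a := r1+1) (b := r2+1) (f := fun i => ((i, c2) : Int × Int))
    (P := fun p => p.2 = c2 ∧ r1+1 ≤ p.1 ∧ p.1 ≤ r2) (fun i hi1 hi2 => by (try dsimp only); exact ⟨rfl, by omega, by omega⟩)
  have c3' := segchar_neg (a := c2-1) (b := c1-1) (f := fun j => ((r2, j) : Int × Int))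
    (P := fun p => p.1 = r2 ∧ c1 ≤ p.2 ∧ p.2 ≤ c2-1) (fun j hj1 hj2 => by (try dsimp only); exact ⟨rfl, by omega, by omega⟩)
  have c4' := segchar_neg (a := r2-1) (b := r1) (f := fun i => ((i, c1) : Int × Int))
    (P := fun p => p.2 = c1 ∧ r1+1 ≤ p.1 ∧ p.1 ≤ r2-1) (fun i hi1 hi2 => by (try dsimp only); exact ⟨rfl, by omega, by omega⟩)
  refine List.Nodup.append (List.Nodup.append (List.Nodup.append n1 n2
      (disj_of_sep c1' c2' (fun p hp hq => by omega))) n3 ?_) n4 ?_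
  · rw [List.disjoint_append_left]
    exact ⟨disj_of_sep c1' c3' (fun p hp hq => by omega),
           disj_of_sep c2' c3' (fun p hp hq => by omega)⟩
  · rw [List.disjoint_append_left, List.disjoint_append_left]
    exact ⟨⟨disj_of_sep c1' c4' (fun p hp hq => by omega),
            disj_of_sep c2' c4' (fun p hp hq => by omega)⟩,
           disj_of_sep c3' c4' (fun p hp hq => by omega)⟩

theorem mem_posB {r1 c1 r2 c2 : Int} (h1 : r1 < r2) (h2 : c1 < c2) (p : Int × Int) :
    p ∈ posB r1 c1 r2 c2 ↔ onB r1 c1 r2 c2 p := by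
  obtain ⟨u, v⟩ := p
  simp only [posB, onB, List.mem_append, List.mem_map, PySem.List.mem_pyRange_one,
    PySem.List.mem_pyRange_neg_one, List.mem_singleton, Prod.mk.injEq]
  constructor
  · rintro ((((⟨j, hj, rfl, rfl⟩ | ⟨i, hi, rfl, rfl⟩) | ⟨j, hj, rfl, rfl⟩) | ⟨i, hi, rfl, rfl⟩) | ⟨rfl, rfl⟩) <;> omega
  · rintro ⟨hb1, hb2, hb3, hb4, hb5⟩
    by_cases hv1 : v = c1
    · by_cases hur : u = r2
      · exact Or.inl (Or.inl (Or.inl (Or.inr ⟨v, ⟨by omega, by omega⟩, by omega, rfl⟩)))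
      · exact Or.inl (Or.inl (Or.inl (Or.inl ⟨u, ⟨by omega, by omega⟩, rfl, by omega⟩)))
    · by_cases hu2 : u = r2
      · by_cases hv2 : v = c2
        · exact Or.inl (Or.inl (Or.inr ⟨u, ⟨by omega, by omega⟩, rfl, by omega⟩))
        · exact Or.inl (Or.inl (Or.inl (Or.inr ⟨v, ⟨by omega, by omega⟩, by omega, rfl⟩)))
      · by_cases hv2 : v = c2
        · by_cases hu1 : u = r1
          · by_cases hw : c2 = c1 + 1
            · exact Or.inr (by omega)
            · exact Or.inl (Or.inr ⟨v, ⟨by omega, by omega⟩, by omega, rfl⟩)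
          · exact Or.inl (Or.inl (Or.inr ⟨u, ⟨by omega, by omega⟩, rfl, by omega⟩))
        · by_cases hvc : v = c1 + 1
          · exact Or.inr (by omega)
          · exact Or.inl (Or.inr ⟨v, ⟨by omega, by omega⟩, by omega, rfl⟩)

theorem nodup_posB {r1 c1 r2 c2 : Int} (h1 : r1 < r2) (h2 : c1 < c2) :
    (posB r1 c1 r2 c2).Nodup := by
  unfold posB
  have n1 : ((PySem.List.pyRange r1 r2 1).map (fun r => ((r, c1) : Int × Int))).Nodup :=
    (PySem.List.nodup_pyRange_one _ _).map (fun x y hxy => by simpa using hxy)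
  have n2 : ((PySem.List.pyRange c1 c2 1).map (fun c => ((r2, c) : Int × Int))).Nodup :=
    (PySem.List.nodup_pyRange_one _ _).map (fun x y hxy => by simpa using hxy)
  have n3 : ((PySem.List.pyRange r2 r1 (-1)).map (fun r => ((r, c2) : Int × Int))).Nodup :=
    (nodup_pyRange_neg _ _).map (fun x y hxy => by simpa using hxy)
  have n4 : ((PySem.List.pyRange c2 (c1+1) (-1)).map (fun c => ((r1, c) : Int × Int))).Nodup :=
    (nodup_pyRange_neg _ _).map (fun x y hxy => by simpa using hxy)
  have c1' := segchar_pos (a := r1) (b := r2) (f := fun r => ((r, c1) : Int × Int))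
    (P := fun p => p.2 = c1 ∧ r1 ≤ p.1 ∧ p.1 ≤ r2-1) (fun r hr1 hr2 => by (try dsimp only); exact ⟨rfl, by omega, by omega⟩)
  have c2' := segchar_pos (a := c1) (b := c2) (f := fun c => ((r2, c) : Int × Int))
    (P := fun p => p.1 = r2 ∧ c1 ≤ p.2 ∧ p.2 ≤ c2-1) (fun c hc1 hc2 => by (try dsimp only); exact ⟨rfl, by omega, by omega⟩)
  have c3' := segchar_neg (a := r2) (b := r1) (f := fun r => ((r, c2) : Int × Int))
    (P := fun p => p.2 = c2 ∧ r1+1 ≤ p.1 ∧ p.1 ≤ r2) (fun r hr1 hr2 => by (try dsimp only); exact ⟨rfl, by omega, by omega⟩)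
  have c4' := segchar_neg (a := c2) (b := c1+1) (f := fun c => ((r1, c) : Int × Int))
    (P := fun p => p.1 = r1 ∧ c1+2 ≤ p.2 ∧ p.2 ≤ c2) (fun c hc1 hc2 => by (try dsimp only); exact ⟨rfl, by omega, by omega⟩)
  have c5' : ∀ p ∈ ([((r1, c1+1) : Int × Int)] : List (Int × Int)), p.1 = r1 ∧ p.2 = c1+1 := by
    intro p hp
    rw [List.mem_singleton] at hp
    subst hp
    exact ⟨rfl, rfl⟩
  refine List.Nodup.append (List.Nodup.append (List.Nodup.append (List.Nodup.append n1 n2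
      (disj_of_sep c1' c2' (fun p hp hq => by omega))) n3 ?_) n4 ?_) (List.nodup_singleton _) ?_
  · rw [List.disjoint_append_left]
    exact ⟨disj_of_sep c1' c3' (fun p hp hq => by omega),
           disj_of_sep c2' c3' (fun p hp hq => by omega)⟩
  · rw [List.disjoint_append_left, List.disjoint_append_left]
    exact ⟨⟨disj_of_sep c1' c4' (fun p hp hq => by omega),
            disj_of_sep c2' c4' (fun p hp hq => by omega)⟩,
           disj_of_sep c3' c4' (fun p hp hq => by omega)⟩
  · rw [List.disjoint_append_left, List.disjoint_append_left, List.disjoint_append_left]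
    exact ⟨⟨⟨disj_of_sep c1' c5' (fun p hp hq => by omega),
             disj_of_sep c2' c5' (fun p hp hq => by omega)⟩,
            disj_of_sep c3' c5' (fun p hp hq => by omega)⟩,
           disj_of_sep c4' c5' (fun p hp hq => by omega)⟩

theorem min?_perm {l1 l2 : List Int} (h : l1.Perm l2) :
    PySem.List.min? l1 (fun y => y) = PySem.List.min? l2 (fun y => y) := by
  have hlen := h.length_eq
  cases l1 with
  | nil =>
    cases l2 with
    | nil => rfl
    | cons b t2 => simp at hlen
  | cons a t1 =>
    cases l2 with
    | nil => simp at hlen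
    | cons b t2 =>
      cases hm1 : PySem.List.min? (a :: t1) (fun y => y) with
      | none =>
        rw [PySem.List.min?_eq_none_iff] at hm1
        simp at hm1
      | some x =>
        cases hm2 : PySem.List.min? (b :: t2) (fun y => y) with
        | none =>
          rw [PySem.List.min?_eq_none_iff] at hm2
          simp at hm2
        | some y =>
          have hx := PySem.List.min?_mem hm1
          have hy := PySem.List.min?_mem hm2
          have hxy := PySem.List.min?_isMin hm1 y (h.mem_iff.mpr hy)
          have hyx := PySem.List.min?_isMin hm2 x (h.mem_iff.mp hx)
          exact congrArg some (le_antisymm hxy hyx)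

theorem zip_trunc {α β : Type} (A : List α) (q : List β) (h : A.length ≤ q.length) :
    A.zip (q.take A.length) = A.zip q := by
  apply List.ext_getElem
  · simp
  · intro i h1 h2
    rw [List.getElem_zip, List.getElem_zip]
    congr 1
    exact List.getElem_take

theorem zip_append' {α β : Type} (A B : List α) (q : List β) (h : A.length ≤ q.length) :
    (A ++ B).zip q = A.zip q ++ B.zip (q.drop A.length) := by
  conv_lhs => rw [← List.take_append_drop A.length q]
  rw [List.zip_append (by rw [List.length_take]; omega), zip_trunc A q h]

theorem update_eq (g : List (List Int)) (x1 y1 x2 y2 : Int) (queue : List Int)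
    (hlen : (posA (x1-1) (y1-1) (x2-1) (y2-1)).length ≤ queue.length) :
    pvUpdate g x1 y1 x2 y2 queue = wr g ((posA (x1-1) (y1-1) (x2-1) (y2-1)).zip queue) := by
  have hl : (posA (x1-1) (y1-1) (x2-1) (y2-1)).length
      = ((y2-(y1-1)).toNat + (x2-x1).toNat + ((y2-2)-(y1-2)).toNat + ((x2-2)-(x1-1)).toNat) := by
    simp [posA, PySem.List.length_pyRange_one, PySem.List.length_pyRange_neg_one] <;> omega
  rw [hl] at hlen
  unfold pvUpdate posA
  rw [show y2 - 1 + 1 = y2 from by ring, show x1 - 1 + 1 = x1 from by ring,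
      show x2 - 1 + 1 = x2 from by ring, show y2 - 1 - 1 = y2 - 2 from by ring,
      show y1 - 1 - 1 = y1 - 2 from by ring, show x2 - 1 - 1 = x2 - 2 from by ring]
  dsimp only
  have e1 := loop_update (PySem.List.pyRange (y1-1) y2 1) (fun i => ((x1-1, i) : Int × Int)) g queue
    (by simp [PySem.List.length_pyRange_one]; omega)
  dsimp only at e1
  rw [e1]
  have e2 := fun (gg : List (List Int)) =>
    loop_update (PySem.List.pyRange x1 x2 1) (fun i => ((i, y2-1) : Int × Int)) gg
      (queue.drop (PySem.List.pyRange (y1-1) y2 1).length)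
      (by simp [PySem.List.length_pyRange_one]; omega)
  dsimp only at e2
  rw [e2]
  have e3 := fun (gg : List (List Int)) =>
    loop_update (PySem.List.pyRange (y2-2) (y1-2) (-1)) (fun i => ((x2-1, i) : Int × Int)) gg
      ((queue.drop (PySem.List.pyRange (y1-1) y2 1).length).drop (PySem.List.pyRange x1 x2 1).length)
      (by simp [PySem.List.length_pyRange_one, PySem.List.length_pyRange_neg_one]; omega)
  dsimp only at e3
  rw [e3]
  have e4 := fun (gg : List (List Int)) =>
    loop_update (PySem.List.pyRange (x2-2) (x1-1) (-1)) (fun i => ((i, y1-1) : Int × Int)) gg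
      (((queue.drop (PySem.List.pyRange (y1-1) y2 1).length).drop (PySem.List.pyRange x1 x2 1).length).drop (PySem.List.pyRange (y2-2) (y1-2) (-1)).length)
      (by simp [PySem.List.length_pyRange_one, PySem.List.length_pyRange_neg_one]; omega)
  dsimp only at e4
  rw [e4]
  dsimp only
  rw [← wr_append, ← wr_append, ← wr_append]
  rw [zip_append' _ _ _ (by simp [PySem.List.length_pyRange_one, PySem.List.length_pyRange_neg_one]; omega),
      zip_append' _ _ _ (by simp [PySem.List.length_pyRange_one, PySem.List.length_pyRange_neg_one]; omega),
      zip_append' _ _ _ (by simp [PySem.List.length_pyRange_one]; omega)]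
  simp [List.length_append, List.length_map, List.drop_drop, Nat.add_comm, Nat.add_assoc,
    Nat.add_left_comm]

theorem predp_eval (r1 c1 r2 c2 u v : Int) : predp r1 c1 r2 c2 (u, v) =
    if v = c1 ∧ u < r2 then (u+1, c1)
    else if u = r2 ∧ v < c2 then (r2, v+1)
    else if v = c2 ∧ r1 < u then (u-1, c2)
    else (u, v-1) := rfl

theorem reindex_pos {α : Type} (a b : Int) (f : Int → α) :
    (PySem.List.pyRange (a+1) (b+1) 1).map (fun j => f (j-1)) = (PySem.List.pyRange a b 1).map f := by
  rw [PySem.List.pyRange_one (a+1) (b+1), PySem.List.pyRange_one a b,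
      show b + 1 - (a + 1) = b - a from by ring, List.map_map, List.map_map]
  exact List.map_congr_left (fun k _ => by
    show f (a + 1 + (k : Int) - 1) = f (a + (k : Int))
    rw [show a + 1 + (k : Int) - 1 = a + (k : Int) from by ring])

theorem reindex_neg {α : Type} (a b : Int) (f : Int → α) :
    (PySem.List.pyRange (a-1) (b-1) (-1)).map (fun j => f (j+1)) = (PySem.List.pyRange a b (-1)).map f := by
  rw [PySem.List.pyRange_neg_one (a-1) (b-1), PySem.List.pyRange_neg_one a b,
      show a - 1 - (b - 1) = a - b from by ring, List.map_map, List.map_map]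
  exact List.map_congr_left (fun k _ => by
    show f (a - 1 - (k : Int) + 1) = f (a - (k : Int))
    rw [show a - 1 - (k : Int) + 1 = a - (k : Int) from by ring])

theorem map_predp_posA {r1 c1 r2 c2 : Int} (h1 : r1 < r2) (h2 : c1 < c2) :
    (posA r1 c1 r2 c2).map (predp r1 c1 r2 c2) = pvRotate1 (posA r1 c1 r2 c2) := by
  unfold posA
  have hs1 : (PySem.List.pyRange c1 (c2+1) 1).map (fun j => ((r1, j) : Int × Int))
      = (PySem.List.pyRange c1 c2 1).map (fun j => ((r1, j) : Int × Int)) ++ [(r1, c2)] := by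
    rw [PySem.List.pyRange_one_succ_right (le_of_lt h2), List.map_append]
    rfl
  have hs2 : (PySem.List.pyRange (r1+1) (r2+1) 1).map (fun i => ((i, c2) : Int × Int))
      = (PySem.List.pyRange (r1+1) r2 1).map (fun i => ((i, c2) : Int × Int)) ++ [(r2, c2)] := by
    rw [PySem.List.pyRange_one_succ_right (by omega), List.map_append]
    rfl
  have hs3 : (PySem.List.pyRange (c2-1) (c1-1) (-1)).map (fun j => ((r2, j) : Int × Int))
      = (PySem.List.pyRange (c2-1) c1 (-1)).map (fun j => ((r2, j) : Int × Int)) ++ [(r2, c1)] := by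
    rw [pyRange_neg_one_snoc (show c1 - 1 < c2 - 1 by omega), List.map_append,
        show c1 - 1 + 1 = c1 from by ring]
    rfl
  have hm1 : (((PySem.List.pyRange c1 (c2+1) 1).map (fun j => ((r1, j) : Int × Int))).map (predp r1 c1 r2 c2))
      = (r1+1, c1) :: (PySem.List.pyRange c1 c2 1).map (fun j => ((r1, j) : Int × Int)) := by
    rw [PySem.List.pyRange_one_cons (show c1 < c2+1 by omega)]
    simp only [List.map_cons, List.map_map]
    rw [show predp r1 c1 r2 c2 (r1, c1) = ((r1+1 : Int), c1) from by
      rw [predp_eval, if_pos ⟨rfl, h1⟩]]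
    refine congrArg (List.cons _) ?_
    have := reindex_pos (a := c1) (b := c2) (f := fun j => ((r1, j) : Int × Int))
    rw [← this]
    exact List.map_congr_left (fun j hj => by
      rw [PySem.List.mem_pyRange_one] at hj
      rw [Function.comp_apply, predp_eval, if_neg (by omega), if_neg (by omega), if_neg (by omega)])
  have hm2 : (((PySem.List.pyRange (r1+1) (r2+1) 1).map (fun i => ((i, c2) : Int × Int))).map (predp r1 c1 r2 c2))
      = (r1, c2) :: (PySem.List.pyRange (r1+1) r2 1).map (fun i => ((i, c2) : Int × Int)) := by
    rw [PySem.List.pyRange_one_cons (show r1+1 < r2+1 by omega)]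
    simp only [List.map_cons, List.map_map]
    rw [show predp r1 c1 r2 c2 (r1+1, c2) = ((r1 : Int), c2) from by
      rw [predp_eval, if_neg (by omega), if_neg (by omega), if_pos ⟨rfl, by omega⟩]
      simp [Prod.mk.injEq] <;> omega]
    refine congrArg (List.cons _) ?_
    have := reindex_pos (a := r1 + 1) (b := r2) (f := fun i => ((i, c2) : Int × Int))
    rw [show PySem.List.pyRange (r1 + 1 + 1) (r2 + 1) 1 = PySem.List.pyRange (r1 + 2) (r2 + 1) 1 from by
      rw [show r1 + 1 + 1 = r1 + 2 from by ring]] at this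
    rw [show PySem.List.pyRange (r1 + 1 + 1) (r2 + 1) 1 = PySem.List.pyRange (r1 + 2) (r2 + 1) 1 from by
      rw [show r1 + 1 + 1 = r1 + 2 from by ring]]
    rw [← this]
    exact List.map_congr_left (fun i hi => by
      rw [PySem.List.mem_pyRange_one] at hi
      rw [Function.comp_apply, predp_eval, if_neg (by omega), if_neg (by omega),
          if_pos ⟨rfl, by omega⟩])
  have hm3 : (((PySem.List.pyRange (c2-1) (c1-1) (-1)).map (fun j => ((r2, j) : Int × Int))).map (predp r1 c1 r2 c2))
      = (r2, c2) :: (PySem.List.pyRange (c2-1) c1 (-1)).map (fun j => ((r2, j) : Int × Int)) := by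
    rw [PySem.List.pyRange_neg_one_cons (show c1 - 1 < c2 - 1 by omega)]
    simp only [List.map_cons, List.map_map]
    rw [show predp r1 c1 r2 c2 (r2, c2-1) = ((r2 : Int), c2) from by
      rw [predp_eval, if_neg (by omega), if_pos ⟨rfl, by omega⟩]
      simp [Prod.mk.injEq] <;> omega]
    refine congrArg (List.cons _) ?_
    have := reindex_neg (a := c2 - 1) (b := c1) (f := fun j => ((r2, j) : Int × Int))
    rw [← this]
    exact List.map_congr_left (fun j hj => by
      rw [PySem.List.mem_pyRange_neg_one] at hj
      rw [Function.comp_apply, predp_eval, if_neg (by omega), if_pos ⟨rfl, by omega⟩])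
  by_cases hcase : r1 + 1 < r2
  · have hs4 : (PySem.List.pyRange (r2-1) r1 (-1)).map (fun i => ((i, c1) : Int × Int))
        = (PySem.List.pyRange (r2-1) (r1+1) (-1)).map (fun i => ((i, c1) : Int × Int)) ++ [(r1+1, c1)] := by
      rw [pyRange_neg_one_snoc (show r1 < r2 - 1 by omega), List.map_append,
          show r1 + 1 = r1 + 1 from rfl]
      rfl
    have hm4 : (((PySem.List.pyRange (r2-1) r1 (-1)).map (fun i => ((i, c1) : Int × Int))).map (predp r1 c1 r2 c2))
        = (r2, c1) :: (PySem.List.pyRange (r2-1) (r1+1) (-1)).map (fun i => ((i, c1) : Int × Int)) := by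
      rw [PySem.List.pyRange_neg_one_cons (show r1 < r2 - 1 by omega)]
      simp only [List.map_cons, List.map_map]
      rw [show predp r1 c1 r2 c2 (r2-1, c1) = ((r2 : Int), c1) from by
        rw [predp_eval, if_pos ⟨rfl, by omega⟩]
        simp [Prod.mk.injEq] <;> omega]
      refine congrArg (List.cons _) ?_
      have := reindex_neg (a := r2 - 1) (b := r1 + 1) (f := fun i => ((i, c1) : Int × Int))
      rw [show r1 + 1 - 1 = r1 from by ring] at this
      rw [← this]
      exact List.map_congr_left (fun i hi => by
        rw [PySem.List.mem_pyRange_neg_one] at hi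
        rw [Function.comp_apply, predp_eval, if_pos ⟨rfl, by omega⟩])
    rw [List.map_append, List.map_append, List.map_append, hm1, hm2, hm3, hm4]
    rw [hs1, hs2, hs3, hs4]
    have hassoc : ∀ (A B CC D : List (Int × Int)) (a1 a2 a3 a4 : Int × Int),
        (((A ++ [a1]) ++ (B ++ [a2])) ++ (CC ++ [a3])) ++ (D ++ [a4])
        = ((((A ++ [a1]) ++ (B ++ [a2])) ++ (CC ++ [a3])) ++ D) ++ [a4] := by
      intros
      simp [List.append_assoc]
    rw [hassoc, rot_snoc]
    simp [List.append_assoc]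
  · have hr2 : r2 = r1 + 1 := by omega
    subst hr2
    have hs4 : (PySem.List.pyRange (r1+1-1) r1 (-1)).map (fun i => ((i, c1) : Int × Int)) = [] := by
      rw [PySem.List.pyRange_neg_one_eq_nil (by omega)]
      rfl
    rw [List.map_append, List.map_append, List.map_append, hm1, hm2, hm3, hs4]
    rw [hs1, hs2, hs3]
    have hassoc2 : ∀ (A B CC : List (Int × Int)) (a1 a2 a3 : Int × Int),
        ((((A ++ [a1]) ++ (B ++ [a2])) ++ (CC ++ [a3])) ++ ([] : List (Int × Int)))
        = (((A ++ [a1]) ++ (B ++ [a2])) ++ CC) ++ [a3] := by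
      intros
      simp [List.append_assoc]
    rw [hassoc2, rot_snoc]
    simp [List.append_assoc]

-- the cells B reads, in B's order, headed by the saved corner
def readsB (r1 c1 r2 c2 : Int) : List (Int × Int) :=
  (r1, c1) ::
    ((PySem.List.pyRange r1 r2 1).map (fun r => (r+1, c1))
     ++ (PySem.List.pyRange c1 c2 1).map (fun c => (r2, c+1))
     ++ (PySem.List.pyRange r2 r1 (-1)).map (fun r => (r-1, c2))
     ++ (PySem.List.pyRange c2 (c1+1) (-1)).map (fun c => (r1, c-1)))

theorem predp_w1 {r1 c1 r2 c2 : Int} (h1 : r1 < r2) (h2 : c1 < c2) :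
    ∀ k ∈ PySem.List.pyRange r1 r2 1, predp r1 c1 r2 c2 (k, c1) = (k+1, c1) := by
  intro k hk
  rw [PySem.List.mem_pyRange_one] at hk
  rw [predp_eval, if_pos ⟨rfl, by omega⟩]

theorem predp_w2 {r1 c1 r2 c2 : Int} (h1 : r1 < r2) (h2 : c1 < c2) :
    ∀ k ∈ PySem.List.pyRange c1 c2 1, predp r1 c1 r2 c2 (r2, k) = (r2, k+1) := by
  intro k hk
  rw [PySem.List.mem_pyRange_one] at hk
  rw [predp_eval, if_neg (by omega), if_pos ⟨rfl, by omega⟩]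

theorem predp_w3 {r1 c1 r2 c2 : Int} (h1 : r1 < r2) (h2 : c1 < c2) :
    ∀ k ∈ PySem.List.pyRange r2 r1 (-1), predp r1 c1 r2 c2 (k, c2) = (k-1, c2) := by
  intro k hk
  rw [PySem.List.mem_pyRange_neg_one] at hk
  rw [predp_eval, if_neg (by omega), if_neg (by omega), if_pos ⟨rfl, by omega⟩]

theorem predp_w4 {r1 c1 r2 c2 : Int} (h1 : r1 < r2) (h2 : c1 < c2) :
    ∀ k ∈ PySem.List.pyRange c2 (c1+1) (-1), predp r1 c1 r2 c2 (r1, k) = (r1, k-1) := by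
  intro k hk
  rw [PySem.List.mem_pyRange_neg_one] at hk
  rw [predp_eval, if_neg (by omega), if_neg (by omega), if_neg (by omega)]

theorem predp_w5 {r1 c1 r2 c2 : Int} (h1 : r1 < r2) (h2 : c1 < c2) :
    predp r1 c1 r2 c2 (r1, c1+1) = (r1, c1) := by
  rw [predp_eval, if_neg (by omega), if_neg (by omega), if_neg (by omega)]
  simp [Prod.mk.injEq] <;> omega

theorem map_predp_posB {r1 c1 r2 c2 : Int} (h1 : r1 < r2) (h2 : c1 < c2) :
    (posB r1 c1 r2 c2).map (predp r1 c1 r2 c2) = (readsB r1 c1 r2 c2).tail ++ [(r1, c1)] := by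
  unfold posB readsB
  simp only [List.map_append, List.map_map, List.map_cons, List.map_nil, List.tail_cons]
  rw [show ((PySem.List.pyRange r1 r2 1).map (predp r1 c1 r2 c2 ∘ fun r => (r, c1)))
      = (PySem.List.pyRange r1 r2 1).map (fun r => ((r+1, c1) : Int × Int)) from
    List.map_congr_left (fun k hk => by rw [Function.comp_apply, predp_w1 h1 h2 k hk])]
  rw [show ((PySem.List.pyRange c1 c2 1).map (predp r1 c1 r2 c2 ∘ fun c => (r2, c)))
      = (PySem.List.pyRange c1 c2 1).map (fun c => ((r2, c+1) : Int × Int)) from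
    List.map_congr_left (fun k hk => by rw [Function.comp_apply, predp_w2 h1 h2 k hk])]
  rw [show ((PySem.List.pyRange r2 r1 (-1)).map (predp r1 c1 r2 c2 ∘ fun r => (r, c2)))
      = (PySem.List.pyRange r2 r1 (-1)).map (fun r => ((r-1, c2) : Int × Int)) from
    List.map_congr_left (fun k hk => by rw [Function.comp_apply, predp_w3 h1 h2 k hk])]
  rw [show ((PySem.List.pyRange c2 (c1+1) (-1)).map (predp r1 c1 r2 c2 ∘ fun c => (r1, c)))
      = (PySem.List.pyRange c2 (c1+1) (-1)).map (fun c => ((r1, c-1) : Int × Int)) from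
    List.map_congr_left (fun k hk => by rw [Function.comp_apply, predp_w4 h1 h2 k hk])]
  rw [show predp r1 c1 r2 c2 (r1, c1+1) = (r1, c1) from predp_w5 h1 h2]

theorem zip_self_map {α β : Type} (l : List α) (h : α → β) :
    l.zip (l.map h) = l.map (fun a => (a, h a)) := by
  induction l with
  | nil => rfl
  | cons a t ih => simp [ih]

-- pointwise value of a border rewrite
theorem gg_wr_border_mem {R C r1 c1 r2 c2 : Int} {g : List (List Int)} (hwf : Wf R C g)
    {Q : List (Int × Int)} (hnd : Q.Nodup) (hmem : ∀ p, p ∈ Q ↔ onB r1 c1 r2 c2 p)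
    (hInB : ∀ p, onB r1 c1 r2 c2 p → InB R C p) (V : (Int × Int) → Int)
    (x : Int × Int) (hb : onB r1 c1 r2 c2 x) :
    gg (wr g (Q.map (fun p => (p, V p)))) x = V x := by
  have hkeys : (Q.map (fun p => (p, V p))).map Prod.fst = Q := by
    simp [List.map_map, Function.comp_def]
  exact gget_wr_mem hwf
    (fun pv hpv => by
      rcases List.mem_map.mp hpv with ⟨p, hp, rfl⟩
      exact hInB p ((hmem p).mp hp))
    (by rw [hkeys]; exact hnd)
    (List.mem_map_of_mem ((hmem x).mpr hb))

theorem gg_wr_border_not {R C r1 c1 r2 c2 : Int} {g : List (List Int)}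
    {Q : List (Int × Int)} (hmem : ∀ p, p ∈ Q ↔ onB r1 c1 r2 c2 p)
    (hInB : ∀ p, onB r1 c1 r2 c2 p → InB R C p) (V : (Int × Int) → Int)
    (x : Int × Int) (hx : InB R C x) (hb : ¬ onB r1 c1 r2 c2 x) :
    gg (wr g (Q.map (fun p => (p, V p)))) x = gg g x := by
  exact gget_wr_ne
    (fun pv hpv => by
      rcases List.mem_map.mp hpv with ⟨p, hp, rfl⟩
      have := hInB p ((hmem p).mp hp)
      exact ⟨this.1, this.2.2.1⟩)
    hx.1 hx.2.2.1
    (fun pv hpv => by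
      rcases List.mem_map.mp hpv with ⟨p, hp, rfl⟩
      intro hc
      dsimp only at hc
      exact hb (hc ▸ (hmem p).mp hp))

theorem stepA_char {R C : Int} {g : List (List Int)} (hwf : Wf R C g) {x1 y1 x2 y2 : Int}
    (hx1 : 1 ≤ x1) (hxx : x1 < x2) (hx2 : x2 ≤ R) (hy1 : 1 ≤ y1) (hyy : y1 < y2) (hy2 : y2 ≤ C)
    (ans : List Int) :
    pvStepA (g, ans) [x1, y1, x2, y2]
    = (wr g ((posA (x1-1) (y1-1) (x2-1) (y2-1)).map
          (fun p => (p, gg g (predp (x1-1) (y1-1) (x2-1) (y2-1) p)))),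
       ans ++ [(PySem.List.min? (((posA (x1-1) (y1-1) (x2-1) (y2-1)).map
          (predp (x1-1) (y1-1) (x2-1) (y2-1))).map (gg g)) (fun y => y)).getD 0]) := by
  have h1 : x1 - 1 < x2 - 1 := by omega
  have h2 : y1 - 1 < y2 - 1 := by omega
  simp only [pvStepA]
  rw [outline_eq]
  have hrot : pvRotate1 ((posA (x1-1) (y1-1) (x2-1) (y2-1)).map (gg g))
      = ((posA (x1-1) (y1-1) (x2-1) (y2-1)).map (predp (x1-1) (y1-1) (x2-1) (y2-1))).map (gg g) := by
    rw [rotate1_map, map_predp_posA h1 h2]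
  rw [hrot]
  rw [update_eq g x1 y1 x2 y2 _ (by simp)]
  have hzip : (posA (x1-1) (y1-1) (x2-1) (y2-1)).zip
        (((posA (x1-1) (y1-1) (x2-1) (y2-1)).map (predp (x1-1) (y1-1) (x2-1) (y2-1))).map (gg g))
      = (posA (x1-1) (y1-1) (x2-1) (y2-1)).map
          (fun p => (p, gg g (predp (x1-1) (y1-1) (x2-1) (y2-1) p))) := by
    rw [List.map_map, zip_self_map]
    rfl
  rw [hzip]
  rw [outline_eq]
  have hq2 : (posA (x1-1) (y1-1) (x2-1) (y2-1)).map
        (gg (wr g ((posA (x1-1) (y1-1) (x2-1) (y2-1)).map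
          (fun p => (p, gg g (predp (x1-1) (y1-1) (x2-1) (y2-1) p))))))
      = ((posA (x1-1) (y1-1) (x2-1) (y2-1)).map
          (predp (x1-1) (y1-1) (x2-1) (y2-1))).map (gg g) := by
    rw [List.map_map]
    refine List.map_congr_left (fun p hp => ?_)
    have hb := (mem_posA h1 h2 p).mp hp
    have := gg_wr_border_mem (r1 := x1-1) (c1 := y1-1) (r2 := x2-1) (c2 := y2-1) hwf
      (nodup_posA h1 h2) (mem_posA h1 h2)
      (fun q hq => by obtain ⟨u, v⟩ := q; obtain ⟨hq1, hq2, hq3, hq4, hq5⟩ := hq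
                      exact ⟨by omega, by omega, by omega, by omega⟩)
      (fun p => gg g (predp (x1-1) (y1-1) (x2-1) (y2-1) p)) p hb
    rw [this, Function.comp_apply]
  rw [hq2]

theorem loop_shift_outer (ks : List Int) (w rd : Int → Int × Int) (base : List (List Int))
    (L : List ((Int × Int) × Int)) (m : Int)
    (hfresh : List.Pairwise (fun a b => w a ≠ rd b) ks)
    (hself : ∀ k ∈ ks, w k ≠ rd k)
    (hnn : ∀ k ∈ ks, (0 ≤ (w k).1 ∧ 0 ≤ (w k).2) ∧ (0 ≤ (rd k).1 ∧ 0 ≤ (rd k).2))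
    (hLkeys : ∀ pv ∈ L, 0 ≤ pv.1.1 ∧ 0 ≤ pv.1.2)
    (hnotin : ∀ k ∈ ks, ∀ pv ∈ L, pv.1 ≠ rd k) :
    ks.foldl (fun (gm : List (List Int) × Int) k =>
        let v := gget gm.1 (rd k).1 (rd k).2
        (gset gm.1 (w k).1 (w k).2 v, if v < gm.2 then v else gm.2)) (wr base L, m)
    = (wr base (L ++ ks.map (fun k => (w k, gg base (rd k)))),
       ks.foldl (fun m k => let v := gg base (rd k); if v < m then v else m) m) := by
  rw [loop_shift ks w rd (wr base L) m hfresh hself hnn, wr_append]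
  have hre : ∀ k ∈ ks, gg (wr base L) (rd k) = gg base (rd k) := by
    intro k hk
    exact gget_wr_ne hLkeys (hnn k hk).2.1 (hnn k hk).2.2 (fun pv hpv => hnotin k hk pv hpv)
  refine Prod.ext ?_ ?_
  · exact congrArg (wr (wr base L)) (List.map_congr_left (fun k hk => by rw [hre k hk]))
  · exact PySem.List.foldl_congr_mem' _ _ _ _ (fun k hk acc => by simp only [hre k hk])

theorem stepB_char {R C : Int} {g : List (List Int)} (hwf : Wf R C g) {x1 y1 x2 y2 : Int}
    (hx1 : 1 ≤ x1) (hxx : x1 < x2) (hx2 : x2 ≤ R) (hy1 : 1 ≤ y1) (hyy : y1 < y2) (hy2 : y2 ≤ C)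
    (ans : List Int) :
    pvStepB (g, ans) [x1, y1, x2, y2]
    = (wr g ((posB (x1-1) (y1-1) (x2-1) (y2-1)).map
          (fun p => (p, gg g (predp (x1-1) (y1-1) (x2-1) (y2-1) p)))),
       ans ++ [(PySem.List.min? ((readsB (x1-1) (y1-1) (x2-1) (y2-1)).map (gg g)) (fun y => y)).getD 0]) := by
  have h1 : x1 - 1 < x2 - 1 := by omega
  have h2 : y1 - 1 < y2 - 1 := by omega
  have hdesc3 : (PySem.List.pyRange (x2-1) (x1-1) (-1)).Pairwise (fun a b => b < a) := by
    rw [PySem.List.pyRange_neg_one_eq_reverse, List.pairwise_reverse]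
    exact PySem.List.pairwise_lt_pyRange_one _ _
  have hdesc4 : (PySem.List.pyRange (y2-1) ((y1-1)+1) (-1)).Pairwise (fun a b => b < a) := by
    rw [PySem.List.pyRange_neg_one_eq_reverse, List.pairwise_reverse]
    exact PySem.List.pairwise_lt_pyRange_one _ _
  simp only [pvStepB]
  -- loop 1 (left column)
  have f1 := loop_shift (PySem.List.pyRange (x1-1) (x2-1) 1)
      (fun k => ((k, y1-1) : Int × Int)) (fun k => ((k+1, y1-1) : Int × Int)) g
      (gget g (x1-1) (y1-1))
      ((PySem.List.pairwise_lt_pyRange_one _ _).imp (fun hab heq => by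
        rw [Prod.mk.injEq] at heq; omega))
      (fun k hk heq => by rw [Prod.mk.injEq] at heq; omega)
      (fun k hk => by
        rw [PySem.List.mem_pyRange_one] at hk
        refine ⟨⟨?_, ?_⟩, ?_, ?_⟩ <;> first | omega | (dsimp only; omega))
  dsimp only at f1
  rw [f1]
  -- loop 2 (bottom row)
  have f2 := fun (m2 : Int) => loop_shift_outer (PySem.List.pyRange (y1-1) (y2-1) 1)
      (fun k => ((x2-1, k) : Int × Int)) (fun k => ((x2-1, k+1) : Int × Int)) g
      ((PySem.List.pyRange (x1-1) (x2-1) 1).map (fun k => (((k, y1-1) : Int × Int), gg g (k+1, y1-1)))) m2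
      ((PySem.List.pairwise_lt_pyRange_one _ _).imp (fun hab heq => by
        rw [Prod.mk.injEq] at heq; omega))
      (fun k hk heq => by rw [Prod.mk.injEq] at heq; omega)
      (fun k hk => by
        rw [PySem.List.mem_pyRange_one] at hk
        refine ⟨⟨?_, ?_⟩, ?_, ?_⟩ <;> first | omega | (dsimp only; omega))
      (fun pv hpv => by
        rcases List.mem_map.mp hpv with ⟨k, hk, rfl⟩
        rw [PySem.List.mem_pyRange_one] at hk
        refine ⟨?_, ?_⟩ <;> first | omega | (dsimp only; omega))
      (fun k hk pv hpv => by
        rcases List.mem_map.mp hpv with ⟨k', hk', rfl⟩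
        rw [PySem.List.mem_pyRange_one] at hk hk'
        intro heq
        rw [Prod.mk.injEq] at heq
        omega)
  dsimp only at f2
  rw [f2]
  -- loop 3 (right column)
  have f3 := fun (m3 : Int) => loop_shift_outer (PySem.List.pyRange (x2-1) (x1-1) (-1))
      (fun k => ((k, y2-1) : Int × Int)) (fun k => ((k-1, y2-1) : Int × Int)) g
      ((PySem.List.pyRange (x1-1) (x2-1) 1).map (fun k => (((k, y1-1) : Int × Int), gg g (k+1, y1-1)))
        ++ (PySem.List.pyRange (y1-1) (y2-1) 1).map (fun k => (((x2-1, k) : Int × Int), gg g (x2-1, k+1)))) m3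
      (hdesc3.imp (fun hab heq => by rw [Prod.mk.injEq] at heq; omega))
      (fun k hk heq => by rw [Prod.mk.injEq] at heq; omega)
      (fun k hk => by
        rw [PySem.List.mem_pyRange_neg_one] at hk
        refine ⟨⟨?_, ?_⟩, ?_, ?_⟩ <;> first | omega | (dsimp only; omega))
      (fun pv hpv => by
        rcases List.mem_append.mp hpv with hpv' | hpv' <;>
          (rcases List.mem_map.mp hpv' with ⟨k, hk, rfl⟩
           rw [PySem.List.mem_pyRange_one] at hk
           refine ⟨?_, ?_⟩ <;> first | omega | (dsimp only; omega)))
      (fun k hk pv hpv => by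
        rw [PySem.List.mem_pyRange_neg_one] at hk
        rcases List.mem_append.mp hpv with hpv' | hpv' <;>
          (rcases List.mem_map.mp hpv' with ⟨k', hk', rfl⟩
           rw [PySem.List.mem_pyRange_one] at hk'
           intro heq
           rw [Prod.mk.injEq] at heq
           omega))
  dsimp only at f3
  rw [f3]
  -- loop 4 (top row)
  have f4 := fun (m4 : Int) => loop_shift_outer (PySem.List.pyRange (y2-1) ((y1-1)+1) (-1))
      (fun k => ((x1-1, k) : Int × Int)) (fun k => ((x1-1, k-1) : Int × Int)) g
      (((PySem.List.pyRange (x1-1) (x2-1) 1).map (fun k => (((k, y1-1) : Int × Int), gg g (k+1, y1-1)))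
        ++ (PySem.List.pyRange (y1-1) (y2-1) 1).map (fun k => (((x2-1, k) : Int × Int), gg g (x2-1, k+1))))
        ++ (PySem.List.pyRange (x2-1) (x1-1) (-1)).map (fun k => (((k, y2-1) : Int × Int), gg g (k-1, y2-1)))) m4
      (hdesc4.imp (fun hab heq => by rw [Prod.mk.injEq] at heq; omega))
      (fun k hk heq => by rw [Prod.mk.injEq] at heq; omega)
      (fun k hk => by
        rw [PySem.List.mem_pyRange_neg_one] at hk
        refine ⟨⟨?_, ?_⟩, ?_, ?_⟩ <;> first | omega | (dsimp only; omega))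
      (fun pv hpv => by
        rcases List.mem_append.mp hpv with hpv' | hpv'
        · rcases List.mem_append.mp hpv' with hpv'' | hpv'' <;>
            (rcases List.mem_map.mp hpv'' with ⟨k, hk, rfl⟩
             rw [PySem.List.mem_pyRange_one] at hk
             refine ⟨?_, ?_⟩ <;> first | omega | (dsimp only; omega))
        · rcases List.mem_map.mp hpv' with ⟨k, hk, rfl⟩
          rw [PySem.List.mem_pyRange_neg_one] at hk
          refine ⟨?_, ?_⟩ <;> first | omega | (dsimp only; omega))
      (fun k hk pv hpv => by
        rw [PySem.List.mem_pyRange_neg_one] at hk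
        rcases List.mem_append.mp hpv with hpv' | hpv'
        · rcases List.mem_append.mp hpv' with hpv'' | hpv'' <;>
            (rcases List.mem_map.mp hpv'' with ⟨k', hk', rfl⟩
             rw [PySem.List.mem_pyRange_one] at hk'
             intro heq
             rw [Prod.mk.injEq] at heq
             omega)
        · rcases List.mem_map.mp hpv' with ⟨k', hk', rfl⟩
          rw [PySem.List.mem_pyRange_neg_one] at hk'
          intro heq
          rw [Prod.mk.injEq] at heq
          omega)
  dsimp only at f4
  rw [f4]
  dsimp only
  refine Prod.ext ?_ ?_
  · -- grids
    dsimp only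
    rw [show ∀ (L : List ((Int × Int) × Int)) (v : Int),
          gset (wr g L) (x1-1) ((y1-1)+1) v = wr g (L ++ [(((x1-1 : Int), (y1-1)+1), v)]) from
        fun L v => by rw [wr_append]; rfl]
    refine congrArg (wr g) ?_
    unfold posB
    simp only [List.map_append, List.map_map, List.map_cons, List.map_nil]
    refine congrArg₂ (· ++ ·) (congrArg₂ (· ++ ·) (congrArg₂ (· ++ ·) (congrArg₂ (· ++ ·) ?_ ?_) ?_) ?_) ?_
    · exact (List.map_congr_left (fun k hk => by
        rw [Function.comp_apply, predp_w1 h1 h2 k hk])).symm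
    · exact (List.map_congr_left (fun k hk => by
        rw [Function.comp_apply, predp_w2 h1 h2 k hk])).symm
    · exact (List.map_congr_left (fun k hk => by
        rw [Function.comp_apply, predp_w3 h1 h2 k hk])).symm
    · exact (List.map_congr_left (fun k hk => by
        rw [Function.comp_apply, predp_w4 h1 h2 k hk])).symm
    · rw [predp_w5 h1 h2]
      rfl
  · -- answers
    dsimp only
    refine congrArg (ans ++ [·]) ?_
    rw [show (readsB (x1-1) (y1-1) (x2-1) (y2-1)).map (gg g)
        = gg g (x1-1, y1-1) ::
            (((PySem.List.pyRange (x1-1) (x2-1) 1).map (fun r => ((r+1, y1-1) : Int × Int))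
              ++ (PySem.List.pyRange (y1-1) (y2-1) 1).map (fun c => ((x2-1, c+1) : Int × Int))
              ++ (PySem.List.pyRange (x2-1) (x1-1) (-1)).map (fun r => ((r-1, y2-1) : Int × Int))
              ++ (PySem.List.pyRange (y2-1) ((y1-1)+1) (-1)).map (fun c => ((x1-1, c-1) : Int × Int))).map (gg g)) from
      by simp [readsB]]
    rw [PySem.List.min?_id_cons]
    simp only [Option.getD_some]
    simp only [List.map_append, List.foldl_append, List.map_map, List.foldl_map]
    have hminf : ∀ (l : List Int) (f : Int → Int × Int) (a : Int),
        l.foldl (fun m k => min m (gg g (f k))) a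
        = l.foldl (fun m k => let v := gg g (f k); if v < m then v else m) a := by
      intro l f a
      exact PySem.List.foldl_congr_mem' _ _ _ _ (fun k hk acc => by
        dsimp only
        omega)
    rw [← hminf, ← hminf, ← hminf, ← hminf]
    rfl

theorem step_eq {R C : Int} {g : List (List Int)} (hwf : Wf R C g) {x1 y1 x2 y2 : Int}
    (hx1 : 1 ≤ x1) (hxx : x1 < x2) (hx2 : x2 ≤ R) (hy1 : 1 ≤ y1) (hyy : y1 < y2) (hy2 : y2 ≤ C)
    (ans : List Int) :
    pvStepA (g, ans) [x1, y1, x2, y2] = pvStepB (g, ans) [x1, y1, x2, y2]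
    ∧ Wf R C (pvStepA (g, ans) [x1, y1, x2, y2]).1 := by
  have h1 : x1 - 1 < x2 - 1 := by omega
  have h2 : y1 - 1 < y2 - 1 := by omega
  have hInB : ∀ p, onB (x1-1) (y1-1) (x2-1) (y2-1) p → InB R C p := by
    intro p hp
    obtain ⟨u, v⟩ := p
    obtain ⟨ha, hb, hc, hd, he⟩ := hp
    exact ⟨by omega, by omega, by omega, by omega⟩
  rw [stepA_char hwf hx1 hxx hx2 hy1 hyy hy2 ans, stepB_char hwf hx1 hxx hx2 hy1 hyy hy2 ans]
  have hgrid : wr g ((posA (x1-1) (y1-1) (x2-1) (y2-1)).map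
        (fun p => (p, gg g (predp (x1-1) (y1-1) (x2-1) (y2-1) p))))
      = wr g ((posB (x1-1) (y1-1) (x2-1) (y2-1)).map
        (fun p => (p, gg g (predp (x1-1) (y1-1) (x2-1) (y2-1) p)))) := by
    refine grid_ext (R := R) (C := C) (wr_wf hwf _) (wr_wf hwf _) ?_
    intro p hp
    by_cases hb : onB (x1-1) (y1-1) (x2-1) (y2-1) p
    · rw [gg_wr_border_mem hwf (nodup_posA h1 h2) (mem_posA h1 h2) hInB _ p hb,
          gg_wr_border_mem hwf (nodup_posB h1 h2) (mem_posB h1 h2) hInB _ p hb]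
    · rw [gg_wr_border_not (mem_posA h1 h2) hInB _ p hp hb,
          gg_wr_border_not (mem_posB h1 h2) hInB _ p hp hb]
  have hpq : (posB (x1-1) (y1-1) (x2-1) (y2-1)).Perm (posA (x1-1) (y1-1) (x2-1) (y2-1)) :=
    (List.perm_ext_iff_of_nodup (nodup_posB h1 h2) (nodup_posA h1 h2)).mpr
      (fun a => by rw [mem_posB h1 h2, mem_posA h1 h2])
  have hAperm : ((posA (x1-1) (y1-1) (x2-1) (y2-1)).map (predp (x1-1) (y1-1) (x2-1) (y2-1))).Perm
      (readsB (x1-1) (y1-1) (x2-1) (y2-1)) := by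
    refine ((hpq.map (predp (x1-1) (y1-1) (x2-1) (y2-1))).symm).trans ?_
    rw [map_predp_posB h1 h2]
    exact List.perm_append_singleton _ _
  have hval : PySem.List.min? (((posA (x1-1) (y1-1) (x2-1) (y2-1)).map
        (predp (x1-1) (y1-1) (x2-1) (y2-1))).map (gg g)) (fun y => y)
      = PySem.List.min? ((readsB (x1-1) (y1-1) (x2-1) (y2-1)).map (gg g)) (fun y => y) :=
    min?_perm (hAperm.map (gg g))
  refine ⟨Prod.ext hgrid (by rw [hval]), ?_⟩
  exact wr_wf hwf _

theorem fold_eq {R C : Int} (qs : List (List Int))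
    (hq : ∀ q ∈ qs, q.length = 4 ∧ 1 ≤ q.getD 0 0 ∧ q.getD 0 0 < q.getD 2 0 ∧ q.getD 2 0 ≤ R ∧
      1 ≤ q.getD 1 0 ∧ q.getD 1 0 < q.getD 3 0 ∧ q.getD 3 0 ≤ C)
    (st : List (List Int) × List Int) (hwf : Wf R C st.1) :
    qs.foldl pvStepA st = qs.foldl pvStepB st := by
  induction qs generalizing st with
  | nil => rfl
  | cons q t ih =>
    obtain ⟨hlen, hb1, hb2, hb3, hb4, hb5, hb6⟩ := hq q List.mem_cons_self
    obtain ⟨a, b, c, d, rfl⟩ : ∃ a b c d, q = [a, b, c, d] := by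
      cases q with
      | nil => simp at hlen
      | cons a t1 =>
        cases t1 with
        | nil => simp at hlen
        | cons b t2 =>
          cases t2 with
          | nil => simp at hlen
          | cons c t3 =>
            cases t3 with
            | nil => simp at hlen
            | cons d t4 =>
              cases t4 with
              | nil => exact ⟨a, b, c, d, rfl⟩
              | cons e t5 => simp at hlen
    simp only [List.getD_cons_zero, List.getD_cons_succ] at hb1 hb2 hb3 hb4 hb5 hb6
    have hstep := step_eq (g := st.1) hwf hb1 hb2 hb3 hb4 hb5 hb6 st.2
    simp only [List.foldl_cons]
    rw [show pvStepA st [a, b, c, d] = pvStepA (st.1, st.2) [a, b, c, d] from rfl,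
        show pvStepB st [a, b, c, d] = pvStepB (st.1, st.2) [a, b, c, d] from rfl,
        hstep.1]
    exact ih (fun q' hq' => hq q' (List.mem_cons_of_mem _ hq')) _ (hstep.1 ▸ hstep.2)

theorem gridB_wf (R C : Int) : Wf R C (pvGridB R C) := by
  constructor
  · simp [pvGridB, PySem.List.length_pyRange_one]
  · intro k hk
    simp [pvGridB, PySem.List.length_pyRange_one]

theorem nodup_initKeys (R C : Int) :
    ((PySem.List.pyRange 0 R 1).flatMap
      (fun i => (PySem.List.pyRange 0 C 1).map (fun j => ((i, j) : Int × Int)))).Nodup := by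
  rw [List.nodup_flatMap]
  constructor
  · intro i _
    exact (PySem.List.nodup_pyRange_one _ _).map (fun x y hxy => by simpa using hxy)
  · refine (PySem.List.pairwise_lt_pyRange_one _ _).imp ?_
    intro a b hab
    intro p hp hq
    rcases List.mem_map.mp hp with ⟨j, _, rfl⟩
    rcases List.mem_map.mp hq with ⟨j', _, hj'⟩
    rw [Prod.mk.injEq] at hj'
    omega

theorem init_eq {R C : Int} (hR : 0 < R) (hC : 0 < C) : pvInitA R C = pvGridB R C := by
  have hwf0 : Wf R C ((PySem.List.pyRange 0 R 1).map
      (fun _ => (PySem.List.pyRange 0 C 1).map (fun _ => (0 : Int)))) := by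
    constructor
    · simp [PySem.List.length_pyRange_one]
    · intro k hk
      simp [PySem.List.length_pyRange_one]
  unfold pvInitA
  dsimp only
  rw [fill_rows]
  dsimp only
  refine grid_ext (R := R) (C := C) (wr_wf hwf0 _) (gridB_wf R C) ?_
  intro p hp
  obtain ⟨i, j⟩ := p
  obtain ⟨hp1, hp2, hp3, hp4⟩ := hp
  have hmem : (((i, j) : Int × Int), (1 : Int) + (i - 0) * ((C.toNat : Nat) : Int) + j)
      ∈ (PySem.List.pyRange 0 R 1).flatMap
        (fun i => (PySem.List.pyRange 0 C 1).map
          (fun j => (((i, j) : Int × Int), (1 : Int) + (i - 0) * ((C.toNat : Nat) : Int) + j))) := by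
    rw [List.mem_flatMap]
    exact ⟨i, by rw [PySem.List.mem_pyRange_one]; omega,
      List.mem_map.mpr ⟨j, by rw [PySem.List.mem_pyRange_one]; omega, rfl⟩⟩
  have hkeys : ((PySem.List.pyRange 0 R 1).flatMap
      (fun i => (PySem.List.pyRange 0 C 1).map
        (fun j => (((i, j) : Int × Int), (1 : Int) + (i - 0) * ((C.toNat : Nat) : Int) + j)))).map Prod.fst
      = (PySem.List.pyRange 0 R 1).flatMap
        (fun i => (PySem.List.pyRange 0 C 1).map (fun j => ((i, j) : Int × Int))) := by
    rw [List.map_flatMap]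
    exact List.flatMap_congr (fun i _ => by
      rw [List.map_map]
      exact List.map_congr_left (fun j _ => rfl))
  have hL : gg (wr ((PySem.List.pyRange 0 R 1).map
        (fun _ => (PySem.List.pyRange 0 C 1).map (fun _ => (0 : Int))))
      ((PySem.List.pyRange 0 R 1).flatMap
        (fun i => (PySem.List.pyRange 0 C 1).map
          (fun j => (((i, j) : Int × Int), (1 : Int) + (i - 0) * ((C.toNat : Nat) : Int) + j))))) (i, j)
      = 1 + (i - 0) * ((C.toNat : Nat) : Int) + j := by
    refine gget_wr_mem (R := R) (C := C) hwf0 ?_ ?_ hmem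
    · intro pv hpv
      rcases List.mem_flatMap.mp hpv with ⟨i', hi', hpv'⟩
      rcases List.mem_map.mp hpv' with ⟨j', hj', rfl⟩
      rw [PySem.List.mem_pyRange_one] at hi' hj'
      refine ⟨?_, ?_, ?_, ?_⟩ <;> first | omega | (dsimp only; omega)
    · rw [hkeys]
      exact nodup_initKeys R C
  rw [hL]
  have hRB : gg (pvGridB R C) (i, j) = i * C + j + 1 := by
    unfold gg gget pvGridB
    rw [PySem.List.pyGetD_map_pyRange_of_nonneg _ R i [] (by omega) (by omega)]
    rw [PySem.List.pyGetD_map_pyRange_of_nonneg _ C j 0 (by omega) (by omega)]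
  rw [hRB]
  have : ((C.toNat : Nat) : Int) = C := by omega
  rw [this]
  ring

-- ===== VERDICT (by name: the statement is the Claim_ definition above) =====
theorem solution_spec : Claim_equal_solution := by
  intro rows columns queries _ hpre
  unfold Spec_solution solution solution_alt
  by_cases hq : queries = []
  · subst hq
    rfl
  · obtain ⟨q, hqm⟩ := List.exists_mem_of_ne_nil queries hq
    obtain ⟨hlen, hb1, hb2, hb3, hb4, hb5, hb6⟩ := hpre q hqm
    have hR : 0 < rows := by omega
    have hC : 0 < columns := by omega
    rw [init_eq hR hC]
    rw [fold_eq (R := rows) (C := columns) queries hpre (pvGridB rows columns, [])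
      (gridB_wf rows columns)]
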